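-- pv_equiv track=rewrite | github.com/congman5/Euclid | verifier/t_consequence.py | _enumerate_subs
-- ===== SOURCE A (Python) =====
-- from itertools import product as iprod
-- from typing import Dict, List, Optional, Set, Tuple
--
-- def _enumerate_subs(
--     schema_vars: List[str], points: List[str]
-- ) -> List[Dict[str, str]]:
--     """Enumerate all substitutions for schema variables from points.
--
--     Returns an empty list when the combination count would exceed
--     the safety limit.
--     """
--     if not schema_vars:
--         return [{}]
--     if len(points) ** len(schema_vars) > 50_000:
--         return []
--     result: List[Dict[str, str]] = []
--     for combo in iprod(points, repeat=len(schema_vars)):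
--         result.append(dict(zip(schema_vars, combo)))
--     return result
-- ===== SOURCE B (Python) =====
-- from typing import Dict, List
--
--
-- def _enumerate_subs(
--     schema_vars: List[str], points: List[str]
-- ) -> List[Dict[str, str]]:
--     """Enumerate all substitutions for schema variables from points.
--
--     Incremental build: extend partial substitutions one variable at a
--     time (last variable varies fastest, matching itertools.product).
--     """
--     if not schema_vars:
--         return [{}]
--     if len(points) ** len(schema_vars) > 50_000:
--         return []
--     result: List[Dict[str, str]] = [{}]
--     for var in schema_vars:
--         result = [{**partial, var: p} for partial in result for p in points]
--     return result
-- ===== Notes on version B (the rewrite author's own statement) =====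
-- stated objective: alternative
-- what changed: Replaces the itertools.product enumeration of full tuples (then dict(zip(...)) per tuple) with an incremental build that folds over the schema variables, extending each partial substitution dict by one binding per point.
import Mathlib
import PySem

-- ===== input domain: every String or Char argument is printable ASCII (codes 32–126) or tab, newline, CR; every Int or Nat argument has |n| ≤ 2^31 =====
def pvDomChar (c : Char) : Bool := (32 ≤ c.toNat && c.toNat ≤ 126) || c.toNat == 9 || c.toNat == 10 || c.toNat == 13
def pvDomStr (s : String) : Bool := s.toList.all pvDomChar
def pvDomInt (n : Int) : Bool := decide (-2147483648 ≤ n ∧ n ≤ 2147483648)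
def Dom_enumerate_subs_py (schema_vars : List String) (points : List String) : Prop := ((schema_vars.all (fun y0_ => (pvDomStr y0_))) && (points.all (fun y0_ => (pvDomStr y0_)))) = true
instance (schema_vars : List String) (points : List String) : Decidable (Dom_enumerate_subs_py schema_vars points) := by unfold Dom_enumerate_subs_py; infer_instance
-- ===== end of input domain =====

-- B replaces itertools.product over full tuples by an incremental fold over the
-- schema variables that extends partial substitution dicts; same cost, different
-- decomposition (objective: alternative).

-- ===== PORT A =====
-- itertools.product(points, repeat=n): leftmost coordinate varies slowest
def pvProd (points : List String) : Nat → List (List String)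
  | 0 => [[]]
  | n + 1 => points.flatMap (fun p => (pvProd points n).map (fun c => p :: c))

-- dict(zip(schema_vars, combo)): insert pairs left to right (overwrite keeps position)
def pvDictZip (schema_vars : List String) (combo : List String) : List (String × String) :=
  ((schema_vars.zip combo).foldl (fun d kv => d.insert kv.1 kv.2)
    (PySem.Dict.empty : PySem.Dict String String)).items

def enumerate_subs_py (schema_vars : List String) (points : List String) : List (List (String × String)) :=
  if schema_vars = [] then [[]]
  else if ((points.length : Int) ^ schema_vars.length > 50000) then []
  else (pvProd points schema_vars.length).foldl
    (fun result combo => result ++ [pvDictZip schema_vars combo]) []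

-- ===== PORT B =====
-- one step of the comprehension: [ {**partial, var: p} for partial in result for p in points ]
def pvStep (points : List String) (result : List (PySem.Dict String String)) (v : String) :
    List (PySem.Dict String String) :=
  result.flatMap (fun part => points.map (fun p => part.insert v p))

def enumerate_subs_py_alt (schema_vars : List String) (points : List String) : List (List (String × String)) :=
  if schema_vars = [] then [[]]
  else if ((points.length : Int) ^ schema_vars.length > 50000) then []
  else (schema_vars.foldl (pvStep points) [PySem.Dict.empty]).map (·.items)

-- ===== PRECONDITION & SPEC =====
def Spec_enumerate_subs_py (schema_vars : List String) (points : List String) (out : List (List (String × String))) : Prop := out = enumerate_subs_py_alt schema_vars points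
instance (schema_vars : List String) (points : List String) (out : List (List (String × String))) : Decidable (Spec_enumerate_subs_py schema_vars points out) := by unfold Spec_enumerate_subs_py; infer_instance

-- ===== CLAIM (what is proved, stated in full; the proofs are below) =====
def Claim_equal_enumerate_subs_py : Prop := ∀ (schema_vars : List String) (points : List String), Dom_enumerate_subs_py schema_vars points → Spec_enumerate_subs_py schema_vars points (enumerate_subs_py schema_vars points)

-- ===== LEMMAS AND PROOFS =====

-- the appending loop of A is a map
theorem pv_foldl_append_map {α β : Type} (f : α → β) :
    ∀ (l : List α) (acc : List β),
      l.foldl (fun r x => r ++ [f x]) acc = acc ++ l.map f := by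
  intro l
  induction l with
  | nil => simp
  | cons x xs ih => intro acc; simp [List.foldl, ih]

-- B's fold distributes over ++ of the accumulated dict lists
theorem pvStep_foldl_append (points : List String) :
    ∀ (vs : List String) (l₁ l₂ : List (PySem.Dict String String)),
      vs.foldl (pvStep points) (l₁ ++ l₂) =
        vs.foldl (pvStep points) l₁ ++ vs.foldl (pvStep points) l₂ := by
  intro vs
  induction vs with
  | nil => simp
  | cons v vs ih =>
      intro l₁ l₂
      simp [List.foldl, pvStep, List.flatMap_append, ih]

-- B's fold keeps an empty accumulator empty
theorem pvStep_foldl_nil (points : List String) :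
    ∀ (vs : List String), vs.foldl (pvStep points) [] = [] := by
  intro vs
  induction vs with
  | nil => rfl
  | cons v vs ih => simp [List.foldl, pvStep, ih]

-- B's fold started from a mapped list splits into a flatMap of singleton starts
theorem pvStep_foldl_map (points vs : List String)
    (g : String → PySem.Dict String String) :
    ∀ (ps : List String),
      vs.foldl (pvStep points) (ps.map g) =
        ps.flatMap (fun p => vs.foldl (pvStep points) [g p]) := by
  intro ps
  induction ps with
  | nil => simp [pvStep_foldl_nil]
  | cons p ps ih =>
      have : (p :: ps).map g = [g p] ++ ps.map g := by simp
      rw [this, pvStep_foldl_append, ih]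
      simp

-- main invariant: B's incremental build produces exactly the zip-dicts of A's product tuples
theorem pv_build_eq (points : List String) :
    ∀ (vs : List String) (d : PySem.Dict String String),
      vs.foldl (pvStep points) [d] =
        (pvProd points vs.length).map
          (fun c => (vs.zip c).foldl (fun a kv => a.insert kv.1 kv.2) d) := by
  intro vs
  induction vs with
  | nil => intro d; simp [pvProd]
  | cons v vs ih =>
      intro d
      have h1 : (v :: vs).foldl (pvStep points) [d] =
          vs.foldl (pvStep points) (points.map (fun p => d.insert v p)) := by
        simp [List.foldl, pvStep]
      rw [h1, pvStep_foldl_map points vs (fun p => d.insert v p)]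
      simp only [List.length_cons, pvProd, List.map_flatMap]
      apply List.flatMap_congr
      intro p _
      rw [ih (d.insert v p)]
      simp [List.map_map]

-- ===== VERDICT (by name: the statement is the Claim_ definition above) =====
theorem enumerate_subs_py_spec : Claim_equal_enumerate_subs_py := by
  intro schema_vars points _
  unfold Spec_enumerate_subs_py enumerate_subs_py enumerate_subs_py_alt
  split_ifs with h1 h2
  · rfl
  · rfl
  · rw [pv_foldl_append_map, pv_build_eq, List.map_map]
    simp [pvDictZip, Function.comp]
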